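-- pv_equiv track=rewrite | github.com/eaysu/cse321-assignments | 1901042671_enes_aysu_hw4/question5.py | divide_and_conquer_resource_allocation
-- ===== SOURCE A (Python) =====
-- def get_resource_demand(task):
--     return task['resource_demand']
--
-- def divide_and_conquer_resource_allocation(tasks, start, end):
--     if start == end:
--         return {'max_task': tasks[start], 'min_task': tasks[start]}
--
--     mid = (start + end) // 2
--
--     left_result = divide_and_conquer_resource_allocation(tasks, start, mid)
--     right_result = divide_and_conquer_resource_allocation(tasks, mid + 1, end)
--
--     # combine results from subproblems using the named function
--     max_task = max(left_result['max_task'], right_result['max_task'], key=get_resource_demand)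
--     min_task = min(left_result['min_task'], right_result['min_task'], key=get_resource_demand)
--
--     return {'max_task': max_task, 'min_task': min_task}
-- ===== SOURCE B (Python) =====
-- def divide_and_conquer_resource_allocation(tasks, start, end):
--     max_task = min_task = tasks[start]
--     for i in range(start + 1, end + 1):
--         t = tasks[i]
--         if t['resource_demand'] > max_task['resource_demand']:
--             max_task = t
--         if t['resource_demand'] < min_task['resource_demand']:
--             min_task = t
--     return {'max_task': max_task, 'min_task': min_task}
-- ===== Notes on version B (the rewrite author's own statement) =====
-- stated objective: simpler
-- what changed: Replaces the divide-and-conquer recursion with a single left-to-right pass keeping the current max/min task, using strict comparisons so ties keep the leftmost task exactly like A's first-argument-wins max/min combine.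
import Mathlib
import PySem

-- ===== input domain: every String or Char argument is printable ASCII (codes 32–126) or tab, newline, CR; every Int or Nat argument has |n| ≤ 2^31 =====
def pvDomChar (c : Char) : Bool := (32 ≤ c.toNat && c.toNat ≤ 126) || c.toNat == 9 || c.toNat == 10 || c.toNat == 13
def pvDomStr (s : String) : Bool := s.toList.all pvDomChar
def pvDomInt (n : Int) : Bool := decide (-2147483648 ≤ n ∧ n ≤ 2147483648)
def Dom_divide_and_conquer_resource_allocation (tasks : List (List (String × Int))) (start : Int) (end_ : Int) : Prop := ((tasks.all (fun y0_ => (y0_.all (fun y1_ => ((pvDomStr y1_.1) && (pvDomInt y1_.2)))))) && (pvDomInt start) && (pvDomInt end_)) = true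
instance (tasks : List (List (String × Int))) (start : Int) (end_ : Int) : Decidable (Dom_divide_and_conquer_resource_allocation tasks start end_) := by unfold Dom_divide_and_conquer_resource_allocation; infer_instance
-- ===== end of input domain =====

-- B replaces A's divide-and-conquer recursion by one linear pass keeping the current max/min task (simpler, O(1) space); same return value on all valid ranges.


-- ===== PORT A =====
-- helper get_resource_demand; Python raises KeyError when the key is missing — Pre_ excludes that, the .getD 0 default is never reached inside Pre_
def get_resource_demand (task : List (String × Int)) : Int :=
  (task.lookup "resource_demand").getD 0

-- fuel makes the non-structural recursion total; (end_-start).toNat+1 fuel always suffices when start ≤ end_ (proved below)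
def goA (tasks : List (List (String × Int))) (start end_ : Int) : Nat → List (String × List (String × Int))
  | 0 => []
  | fuel + 1 =>
    if start = end_ then
      let t := (PySem.List.pyGet? tasks start).getD []
      [("max_task", t), ("min_task", t)]
    else
      let mid := PySem.Int.floordiv (start + end_) 2
      let left_result := goA tasks start mid fuel
      let right_result := goA tasks (mid + 1) end_ fuel
      let lmax := (left_result.lookup "max_task").getD []
      let rmax := (right_result.lookup "max_task").getD []
      let lmin := (left_result.lookup "min_task").getD []
      let rmin := (right_result.lookup "min_task").getD []
      -- max(a, b, key=f) returns b iff f b > f a; min(a, b, key=f) returns b iff f b < f a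
      let max_task := if get_resource_demand rmax > get_resource_demand lmax then rmax else lmax
      let min_task := if get_resource_demand rmin < get_resource_demand lmin then rmin else lmin
      [("max_task", max_task), ("min_task", min_task)]

def divide_and_conquer_resource_allocation (tasks : List (List (String × Int))) (start : Int) (end_ : Int) : List (String × List (String × Int)) :=
  goA tasks start end_ ((end_ - start).toNat + 1)

-- ===== PORT B =====
def demandB (t : List (String × Int)) : Int :=
  (t.lookup "resource_demand").getD 0

def divide_and_conquer_resource_allocation_alt (tasks : List (List (String × Int))) (start : Int) (end_ : Int) : List (String × List (String × Int)) :=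
  let t0 := (PySem.List.pyGet? tasks start).getD []
  let r := (PySem.List.pyRange (start + 1) (end_ + 1) 1).foldl
    (fun (st : (List (String × Int)) × (List (String × Int))) i =>
      let t := (PySem.List.pyGet? tasks i).getD []
      (if demandB t > demandB st.1 then t else st.1,
       if demandB t < demandB st.2 then t else st.2)) (t0, t0)
  [("max_task", r.1), ("min_task", r.2)]

-- ===== PRECONDITION & SPEC =====
-- Pre_: exactly where Python A returns — start ≤ end_ (else unbounded recursion / RecursionError),
-- every index in [start, end_] valid under Python's negative-index rule (else IndexError),
-- and, unless start = end_ (the base case never reads the key), every task in the range has the 'resource_demand' key (else KeyError in the combine).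
def Pre_divide_and_conquer_resource_allocation (tasks : List (List (String × Int))) (start : Int) (end_ : Int) : Prop :=
  start ≤ end_ ∧ -(tasks.length : Int) ≤ start ∧ end_ < (tasks.length : Int) ∧
  (start = end_ ∨ ∀ i ∈ PySem.List.pyRange start (end_ + 1) 1,
    (((PySem.List.pyGet? tasks i).getD []).lookup "resource_demand").isSome = true)
instance (tasks : List (List (String × Int))) (start : Int) (end_ : Int) : Decidable (Pre_divide_and_conquer_resource_allocation tasks start end_) := by unfold Pre_divide_and_conquer_resource_allocation; infer_instance

def pvWitness_divide_and_conquer_resource_allocation : (List (List (String × Int))) × Int × Int :=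
  ([[("resource_demand", 3)], [("resource_demand", 1)]], 0, 1)

def Spec_divide_and_conquer_resource_allocation (tasks : List (List (String × Int))) (start : Int) (end_ : Int) (out : List (String × List (String × Int))) : Prop := out = divide_and_conquer_resource_allocation_alt tasks start end_
instance (tasks : List (List (String × Int))) (start : Int) (end_ : Int) (out : List (String × List (String × Int))) : Decidable (Spec_divide_and_conquer_resource_allocation tasks start end_ out) := by unfold Spec_divide_and_conquer_resource_allocation; infer_instance

-- ===== CLAIM (what is proved, stated in full; the proofs are below) =====
def Claim_equal_divide_and_conquer_resource_allocation : Prop := ∀ (tasks : List (List (String × Int))) (start : Int) (end_ : Int), Dom_divide_and_conquer_resource_allocation tasks start end_ → Pre_divide_and_conquer_resource_allocation tasks start end_ → Spec_divide_and_conquer_resource_allocation tasks start end_ (divide_and_conquer_resource_allocation tasks start end_)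

-- ===== LEMMAS AND PROOFS =====
def taskAt (tasks : List (List (String × Int))) (i : Int) : List (String × Int) :=
  (PySem.List.pyGet? tasks i).getD []

def cmax (a b : List (String × Int)) : List (String × Int) :=
  if demandB b > demandB a then b else a

def cmin (a b : List (String × Int)) : List (String × Int) :=
  if demandB b < demandB a then b else a

lemma cmax_assoc (x y z : List (String × Int)) : cmax (cmax x y) z = cmax x (cmax y z) := by
  unfold cmax; split_ifs <;> first | rfl | omega

lemma cmin_assoc (x y z : List (String × Int)) : cmin (cmin x y) z = cmin x (cmin y z) := by
  unfold cmin; split_ifs <;> first | rfl | omega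

lemma foldl_c_assoc {α : Type} (c : α → α → α) (hc : ∀ x y z, c (c x y) z = c x (c y z)) :
    ∀ (l : List α) (x y : α), l.foldl c (c x y) = c x (l.foldl c y) := by
  intro l
  induction l with
  | nil => intro x y; rfl
  | cons a l ih => intro x y; simp only [List.foldl_cons, hc, ih]

-- A computes the left folds of cmax / cmin over the tasks in positions [s, e]
lemma goA_eq (tasks : List (List (String × Int))) :
    ∀ (fuel : Nat) (s e : Int), s ≤ e → (e - s).toNat < fuel →
    goA tasks s e fuel =
      [("max_task", ((PySem.List.pyRange (s + 1) (e + 1) 1).map (taskAt tasks)).foldl cmax (taskAt tasks s)),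
       ("min_task", ((PySem.List.pyRange (s + 1) (e + 1) 1).map (taskAt tasks)).foldl cmin (taskAt tasks s))] := by
  intro fuel
  induction fuel with
  | zero => intro s e _ h; omega
  | succ fuel ih =>
    intro s e hse hfuel
    by_cases heq : s = e
    · subst heq
      rw [PySem.List.pyRange_one_eq_nil (by omega)]
      simp [goA, taskAt]
    · have hlt : s < e := lt_of_le_of_ne hse heq
      set mid := PySem.Int.floordiv (s + e) 2 with hmid
      have hb := PySem.Int.floordiv_two_mid_bounds hse
      have hmidlt : mid < e := by
        rw [hmid, PySem.Int.floordiv_lt_iff_lt_mul (by omega : (0:Int) < 2)]; omega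
      have hsm : s ≤ mid := hb.1
      have ihl := ih s mid hsm (by omega)
      have ihr := ih (mid + 1) e (by omega) (by omega)
      have hsplit : PySem.List.pyRange (s + 1) (e + 1) 1 =
          PySem.List.pyRange (s + 1) (mid + 1) 1 ++ PySem.List.pyRange (mid + 1) (e + 1) 1 :=
        PySem.List.pyRange_one_append _ _ _ (by omega) (by omega)
      have hcons := PySem.List.pyRange_one_cons (a := mid + 1) (b := e + 1) (by omega)
      show goA tasks s e (fuel + 1) = _
      rw [goA]
      simp only [if_neg heq, ← hmid, ihl, ihr]
      rw [hsplit, hcons]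
      simp only [List.map_append, List.map_cons, List.foldl_append, List.foldl_cons]
      have hget : ∀ (X Y : List (String × Int)),
          (([("max_task", X), ("min_task", Y)] : List (String × List (String × Int))).lookup "max_task").getD [] = X ∧
          (([("max_task", X), ("min_task", Y)] : List (String × List (String × Int))).lookup "min_task").getD [] = Y := by
        intro X Y; constructor <;> rfl
      simp only [(hget _ _).1, (hget _ _).2]
      have hmx : ∀ x y l, List.foldl cmax (cmax x y) l = cmax x (List.foldl cmax y l) :=
        fun x y l => foldl_c_assoc cmax cmax_assoc l x y
      have hmn : ∀ x y l, List.foldl cmin (cmin x y) l = cmin x (List.foldl cmin y l) :=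
        fun x y l => foldl_c_assoc cmin cmin_assoc l x y
      rw [show ∀ x y : List (String × Int),
            (if get_resource_demand y > get_resource_demand x then y else x) = cmax x y from
            fun _ _ => rfl]
      rw [show ∀ x y : List (String × Int),
            (if get_resource_demand y < get_resource_demand x then y else x) = cmin x y from
            fun _ _ => rfl]
      rw [← hmx, ← hmn]

-- B's pair fold is the two independent folds
lemma foldB_eq (tasks : List (List (String × Int))) :
    ∀ (l : List Int) (x y : List (String × Int)),
    l.foldl (fun (st : (List (String × Int)) × (List (String × Int))) i =>
        let t := (PySem.List.pyGet? tasks i).getD []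
        (if demandB t > demandB st.1 then t else st.1,
         if demandB t < demandB st.2 then t else st.2)) (x, y) =
      ((l.map (taskAt tasks)).foldl cmax x, (l.map (taskAt tasks)).foldl cmin y) := by
  intro l
  induction l with
  | nil => intro x y; rfl
  | cons a l ih =>
    intro x y
    simp only [List.foldl_cons, List.map_cons, ih]
    rfl

-- ===== VERDICT (by name: the statement is the Claim_ definition above) =====
theorem divide_and_conquer_resource_allocation_spec : Claim_equal_divide_and_conquer_resource_allocation := by
  intro tasks start end_ _ hpre
  unfold Spec_divide_and_conquer_resource_allocation
  unfold divide_and_conquer_resource_allocation divide_and_conquer_resource_allocation_alt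
  rw [goA_eq tasks ((end_ - start).toNat + 1) start end_ hpre.1 (by omega)]
  show _ = [("max_task", _), ("min_task", _)]
  rw [foldB_eq]
  rfl
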